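-- pv_equiv track=rewrite | github.com/Daldek/DaftAcademy | Funkcje.py | type_calc
-- ===== SOURCE A (Python) =====
-- def type_calc(type_dict, input_list):
--     calc = {}
--     for k, v in type_dict.items():
--         for value_pair in input_list:
--             if k == value_pair[0]:
--                 v = v + value_pair[1]
--         calc.update({k: v})
--     return calc
-- ===== SOURCE B (Python) =====
-- def type_calc(type_dict, input_list):
--     sums = {}
--     for key, val in input_list:
--         sums[key] = sums.get(key, 0) + val
--     return {k: v + sums.get(k, 0) for k, v in type_dict.items()}
-- ===== Notes on version B (the rewrite author's own statement) =====
-- stated objective: faster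
-- what changed: Replaces the nested gather (for each dict key, rescan the whole input list) by a single aggregation pass that builds a per-key sum dict once and then a comprehension adding the looked-up sum to each type_dict value.
import Mathlib
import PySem

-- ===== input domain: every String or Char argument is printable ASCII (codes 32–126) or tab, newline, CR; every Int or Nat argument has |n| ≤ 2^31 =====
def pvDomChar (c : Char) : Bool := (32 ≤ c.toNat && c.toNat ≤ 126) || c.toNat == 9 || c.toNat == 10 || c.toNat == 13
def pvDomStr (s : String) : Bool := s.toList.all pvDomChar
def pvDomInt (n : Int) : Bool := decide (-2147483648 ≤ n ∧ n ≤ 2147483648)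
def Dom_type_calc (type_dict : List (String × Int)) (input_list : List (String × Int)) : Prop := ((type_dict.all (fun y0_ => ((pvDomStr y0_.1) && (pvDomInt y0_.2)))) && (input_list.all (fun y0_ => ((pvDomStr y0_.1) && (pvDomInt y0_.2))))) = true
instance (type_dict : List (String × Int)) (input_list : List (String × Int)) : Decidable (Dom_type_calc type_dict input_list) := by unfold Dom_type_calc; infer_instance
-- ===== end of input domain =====

-- B replaces A's nested gather by one aggregation pass over input_list plus a dict
-- comprehension over type_dict (faster: one pass instead of a rescan per key).

-- ===== PORT A =====
-- A: for each (k, v) of type_dict, rescan input_list adding matching values to v,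
-- then calc.update({k: v}); return calc.
def type_calc (type_dict : List (String × Int)) (input_list : List (String × Int)) : List (String × Int) :=
  (type_dict.foldl
    (fun c kv =>
      c.insert kv.1
        (input_list.foldl (fun v p => if kv.1 == p.1 then v + p.2 else v) kv.2))
    (PySem.Dict.empty : PySem.Dict String Int)).items

-- ===== PORT B =====
-- B: build sums[key] = sums.get(key, 0) + val in one pass, then
-- {k: v + sums.get(k, 0) for k, v in type_dict.items()}.
def type_calc_alt (type_dict : List (String × Int)) (input_list : List (String × Int)) : List (String × Int) :=
  let sums : PySem.Dict String Int :=
    input_list.foldl (fun d p => d.insert p.1 (d.getD p.1 0 + p.2)) PySem.Dict.empty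
  (type_dict.foldl
    (fun acc kv => acc.insert kv.1 (kv.2 + sums.getD kv.1 0))
    (PySem.Dict.empty : PySem.Dict String Int)).items

-- ===== PRECONDITION & SPEC =====
def Spec_type_calc (type_dict : List (String × Int)) (input_list : List (String × Int)) (out : List (String × Int)) : Prop := out = type_calc_alt type_dict input_list
instance (type_dict : List (String × Int)) (input_list : List (String × Int)) (out : List (String × Int)) : Decidable (Spec_type_calc type_dict input_list out) := by unfold Spec_type_calc; infer_instance

-- ===== CLAIM (what is proved, stated in full; the proofs are below) =====
def Claim_equal_type_calc : Prop := ∀ (type_dict : List (String × Int)) (input_list : List (String × Int)), Dom_type_calc type_dict input_list → Spec_type_calc type_dict input_list (type_calc type_dict input_list)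

-- ===== LEMMAS AND PROOFS =====

-- sum of the input_list values whose key equals k
def matchSum (k : String) (il : List (String × Int)) : Int :=
  ((il.filter (fun p => k == p.1)).map Prod.snd).sum

theorem innerA_eq_matchSum (k : String) (il : List (String × Int)) (v : Int) :
    il.foldl (fun v p => if k == p.1 then v + p.2 else v) v = v + matchSum k il := by
  induction il generalizing v with
  | nil => simp [matchSum]
  | cons p t ih =>
    rw [List.foldl_cons]
    by_cases h : k = p.1
    · rw [if_pos (by simp [h]), ih]
      simp [matchSum, h]
      ring
    · rw [if_neg (by simp [h]), ih]
      simp [matchSum, h]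

theorem sums_getD (k : String) (il : List (String × Int)) (d : PySem.Dict String Int) :
    (il.foldl (fun d p => d.insert p.1 (d.getD p.1 0 + p.2)) d).getD k 0
      = d.getD k 0 + matchSum k il := by
  induction il generalizing d with
  | nil => simp [matchSum]
  | cons p t ih =>
    rw [List.foldl_cons, ih, PySem.Dict.getD_insert]
    by_cases h : k = p.1
    · subst h
      simp [matchSum]
      ring
    · rw [if_neg h]
      simp [matchSum, h]

theorem folds_eq (type_dict input_list : List (String × Int))
    (acc : PySem.Dict String Int) :
    type_dict.foldl
      (fun c kv =>
        c.insert kv.1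
          (input_list.foldl (fun v p => if kv.1 == p.1 then v + p.2 else v) kv.2)) acc
    = type_dict.foldl
        (fun a kv => a.insert kv.1
          (kv.2 + (input_list.foldl (fun d p => d.insert p.1 (d.getD p.1 0 + p.2))
                     PySem.Dict.empty).getD kv.1 0)) acc := by
  have h1 : (fun (c : PySem.Dict String Int) (kv : String × Int) =>
        c.insert kv.1
          (input_list.foldl (fun v p => if kv.1 == p.1 then v + p.2 else v) kv.2))
      = (fun a kv => a.insert kv.1
          (kv.2 + (input_list.foldl (fun d p => d.insert p.1 (d.getD p.1 0 + p.2))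
                     PySem.Dict.empty).getD kv.1 0)) := by
    funext c kv
    rw [innerA_eq_matchSum, sums_getD, PySem.Dict.getD_empty, zero_add]
  rw [h1]

-- ===== VERDICT (by name: the statement is the Claim_ definition above) =====
theorem type_calc_spec : Claim_equal_type_calc := by
  intro td il _
  unfold Spec_type_calc type_calc type_calc_alt
  rw [folds_eq]
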